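-- pv_equiv track=rewrite | github.com/vbv-nyk/intern_assignment | src/main.py | get_lyrics
-- ===== SOURCE A (Python) =====
-- def remove_templates(content):
--     modified_content = content.replace("{\\rH}", "")
--     modified_content = modified_content.replace("{\\r}", "")
--     return modified_content
--
-- def get_lyrics(dialogues):
--     lyrics = []
--     for i, dialogue in enumerate(dialogues):
--         n = len(lyrics)
--         dialogue = dialogue.split(',')
--         content = ''.join(dialogue[9:])
--         modified_content = remove_templates(content)
--         if n > 0 and lyrics[n - 1] == modified_content: continue
--         lyrics.append(modified_content)
--     return lyrics
-- ===== SOURCE B (Python) =====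
-- def remove_templates(content):
--     modified_content = content.replace("{\\rH}", "")
--     modified_content = modified_content.replace("{\\r}", "")
--     return modified_content
--
-- def get_lyrics(dialogues):
--     # pass 1: map every dialogue to its processed string
--     processed = [remove_templates(''.join(d.split(',')[9:])) for d in dialogues]
--     # pass 2: keep the first element of each run of consecutive equals
--     out = []
--     i = 0
--     n = len(processed)
--     while i < n:
--         key = processed[i]
--         out.append(key)
--         while i < n and processed[i] == key:
--             i += 1
--     return out
-- ===== Notes on version B (the rewrite author's own statement) =====
-- stated objective: idiomatic
-- what changed: B splits the work into two separate passes: a comprehension mapping each dialogue to its processed string, then a run-scanning consecutive-dedup pass that skips whole runs, instead of A's single loop that guards each append by peeking at the last appended element.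
import Mathlib
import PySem

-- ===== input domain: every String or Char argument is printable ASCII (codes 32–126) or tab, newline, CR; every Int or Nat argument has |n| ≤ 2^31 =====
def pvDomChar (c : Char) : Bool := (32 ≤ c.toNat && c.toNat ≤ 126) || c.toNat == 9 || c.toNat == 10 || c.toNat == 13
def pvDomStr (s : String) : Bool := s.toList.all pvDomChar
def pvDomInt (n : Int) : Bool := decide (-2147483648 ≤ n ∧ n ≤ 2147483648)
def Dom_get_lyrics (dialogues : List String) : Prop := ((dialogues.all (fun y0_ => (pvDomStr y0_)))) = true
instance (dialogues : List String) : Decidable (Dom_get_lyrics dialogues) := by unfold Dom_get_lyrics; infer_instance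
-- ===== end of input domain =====

-- B is the same extraction done as two separate passes (map, then run-scanning consecutive dedup); same cost, plainer decomposition.

-- ===== PORT A =====
def remove_templates (content : String) : String :=
  let modified_content := PySem.Str.replace content "{\\rH}" ""
  let modified_content := PySem.Str.replace modified_content "{\\r}" ""
  modified_content

def get_lyrics (dialogues : List String) : List String :=
  dialogues.foldl (fun lyrics dialogue =>
    let n := lyrics.length
    let dialogue := (PySem.Chars.splitOn dialogue.toList ",".toList).map String.ofList
    let content := PySem.Str.join "" (PySem.List.slice dialogue (some 9) none)
    let modified_content := remove_templates content
    if n > 0 ∧ PySem.List.pyGet? lyrics ((n : Int) - 1) = some modified_content then lyrics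
    else lyrics ++ [modified_content]) []

-- ===== PORT B =====
-- the processing of one dialogue (body of Source B's comprehension)
def pvProcess (d : String) : String :=
  remove_templates (PySem.Str.join "" (PySem.List.slice ((PySem.Chars.splitOn d.toList ",".toList).map String.ofList) (some 9) none))

-- Source B's second pass: keep the first element of each run, skip the rest of the run
def pvRunKeys : List String → List String
  | [] => []
  | x :: xs => x :: pvRunKeys (xs.dropWhile (· == x))
termination_by xs => xs.length
decreasing_by simpa using Nat.lt_succ_of_le (List.length_dropWhile_le _ _)

def get_lyrics_alt (dialogues : List String) : List String :=
  pvRunKeys (dialogues.map pvProcess)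

-- ===== PRECONDITION & SPEC =====
def Spec_get_lyrics (dialogues : List String) (out : List String) : Prop := out = get_lyrics_alt dialogues
instance (dialogues : List String) (out : List String) : Decidable (Spec_get_lyrics dialogues out) := by unfold Spec_get_lyrics; infer_instance

-- ===== CLAIM (what is proved, stated in full; the proofs are below) =====
def Claim_equal_get_lyrics : Prop := ∀ (dialogues : List String), Dom_get_lyrics dialogues → Spec_get_lyrics dialogues (get_lyrics dialogues)

-- ===== LEMMAS AND PROOFS =====

-- A's loop step, with the per-element processing abstracted out
def pvStep (lyrics : List String) (dialogue : String) : List String :=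
  let n := lyrics.length
  let dialogue := (PySem.Chars.splitOn dialogue.toList ",".toList).map String.ofList
  let content := PySem.Str.join "" (PySem.List.slice dialogue (some 9) none)
  let modified_content := remove_templates content
  if n > 0 ∧ PySem.List.pyGet? lyrics ((n : Int) - 1) = some modified_content then lyrics
  else lyrics ++ [modified_content]

theorem get_lyrics_eq_foldl (dialogues : List String) :
    get_lyrics dialogues = dialogues.foldl pvStep [] := rfl

-- A's guard is "last element equals the processed string"
theorem pvStep_eq (lyrics : List String) (d : String) :
    pvStep lyrics d =
      if lyrics.getLast? = some (pvProcess d) then lyrics else lyrics ++ [pvProcess d] := by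
  unfold pvStep pvProcess
  rcases h : lyrics.getLast? with _ | x
  · have : lyrics = [] := List.getLast?_eq_none_iff.mp h
    subst this; simp
  · have hne : lyrics ≠ [] := by rintro rfl; simp at h
    have hlen : 0 < lyrics.length := List.length_pos_iff.mpr hne
    have hcast : ((lyrics.length : Int) - 1) = ((lyrics.length - 1 : Nat) : Int) := by omega
    have hget : PySem.List.pyGet? lyrics ((lyrics.length : Int) - 1) = some x := by
      rw [hcast, PySem.List.pyGet?_natCast, ← List.getLast?_eq_getElem?, h]
    simp [hget, hlen]

-- residual consecutive-dedup given the last already-emitted element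
def pvRest (l : Option String) : List String → List String
  | [] => []
  | y :: ys => if some y = l then pvRest l ys else y :: pvRest (some y) ys

theorem foldl_pvStep (xs : List String) (acc : List String) :
    xs.foldl pvStep acc = acc ++ pvRest acc.getLast? (xs.map pvProcess) := by
  induction xs generalizing acc with
  | nil => simp [pvRest]
  | cons d xs ih =>
    simp only [List.foldl_cons, List.map_cons, pvRest, ih, pvStep_eq]
    by_cases h : acc.getLast? = some (pvProcess d)
    · simp [h]
    · have h' : ¬ some (pvProcess d) = acc.getLast? := fun e => h e.symm
      simp [h, h', List.getLast?_append]

theorem pvRest_some (x : String) (ys : List String) :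
    pvRest (some x) ys = pvRunKeys (ys.dropWhile (· == x)) := by
  induction ys generalizing x with
  | nil => simp [pvRest, pvRunKeys]
  | cons y ys ih =>
    rw [List.dropWhile_cons]
    by_cases h : y = x
    · subst h; simpa [pvRest] using ih y
    · simp [pvRest, h, pvRunKeys, ih y]

theorem pvRest_none (ys : List String) : pvRest none ys = pvRunKeys ys := by
  cases ys with
  | nil => simp [pvRest, pvRunKeys]
  | cons y ys => simp [pvRest, pvRunKeys, pvRest_some]

-- ===== VERDICT (by name: the statement is the Claim_ definition above) =====
theorem get_lyrics_spec : Claim_equal_get_lyrics := by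
  intro dialogues _
  unfold Spec_get_lyrics get_lyrics_alt
  rw [get_lyrics_eq_foldl, foldl_pvStep]
  simp [pvRest_none]
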